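-- pv_equiv track=rewrite | github.com/psylabs/art-finder | app.py | create_readable_filename
-- ===== SOURCE A (Python) =====
-- def create_readable_filename(title, artwork_id, museum_abbrev="CMA"):
--     """Create a human-readable filename from museum abbreviation and title"""
--     filename_base = f"{museum_abbrev}-{title}"
--
--     # Remove or replace invalid filename characters
--     invalid_chars = ['<', '>', ':', '"', '/', '\\', '|', '?', '*']
--     for char in invalid_chars:
--         filename_base = filename_base.replace(char, '')
--
--     # Replace multiple spaces with single space
--     filename_base = ' '.join(filename_base.split())
--
--     # Limit total length (leaving room for .jpg)
--     max_length = 100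
--     if len(filename_base) > max_length:
--         filename_base = filename_base[:max_length].strip()
--
--     # Add artwork ID at end to ensure uniqueness
--     filename = f"{filename_base}-{artwork_id}.jpg"
--
--     return filename
-- ===== SOURCE B (Python) =====
-- _INVALID = set('<>:"/\\|?*')
--
-- def create_readable_filename(title, artwork_id, museum_abbrev="CMA"):
--     """Create a human-readable filename from museum abbreviation and title"""
--     # single pass: drop every invalid character at once
--     base = ''.join(c for c in f"{museum_abbrev}-{title}" if c not in _INVALID)
--     base = ' '.join(base.split())
--     if len(base) > 100:
--         base = base[:100].strip()
--     return f"{base}-{artwork_id}.jpg"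
-- ===== Notes on version B (the rewrite author's own statement) =====
-- stated objective: idiomatic
-- what changed: A's nine sequential str.replace passes over the string are replaced by one single-pass filter against a set of invalid characters; the whitespace-collapse, truncation and formatting steps are unchanged.
import Mathlib
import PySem

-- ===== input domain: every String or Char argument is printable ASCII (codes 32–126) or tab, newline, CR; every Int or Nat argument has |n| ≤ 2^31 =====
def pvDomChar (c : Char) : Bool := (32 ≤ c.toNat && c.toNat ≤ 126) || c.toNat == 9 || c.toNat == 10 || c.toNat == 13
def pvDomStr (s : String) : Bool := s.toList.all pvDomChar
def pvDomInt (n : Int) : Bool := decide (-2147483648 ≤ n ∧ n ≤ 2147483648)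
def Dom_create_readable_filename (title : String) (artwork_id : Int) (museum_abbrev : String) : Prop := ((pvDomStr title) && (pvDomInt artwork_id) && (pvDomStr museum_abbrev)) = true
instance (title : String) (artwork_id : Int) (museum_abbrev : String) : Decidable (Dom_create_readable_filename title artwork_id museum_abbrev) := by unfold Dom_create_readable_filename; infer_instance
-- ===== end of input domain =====

-- B replaces A's nine sequential str.replace passes by one membership-filtered pass over the string (idiomatic single-pass cleanup); same value on every input.

-- ===== PORT A =====
def create_readable_filename (title : String) (artwork_id : Int) (museum_abbrev : String) : String :=
  let filename_base := museum_abbrev ++ "-" ++ title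
  let invalid_chars : List String := ["<", ">", ":", "\"", "/", "\\", "|", "?", "*"]
  let filename_base := invalid_chars.foldl (fun s ch => PySem.Str.replace s ch "") filename_base
  let filename_base := PySem.Str.join " " (PySem.Str.split₀ filename_base)
  let filename_base := if PySem.Str.len filename_base > 100 then
      PySem.Str.strip (PySem.Str.slice filename_base none (some 100)) else filename_base
  filename_base ++ "-" ++ PySem.Int.toStr artwork_id ++ ".jpg"

-- ===== PORT B =====
def pvInvalidSet : PySem.Set Char := PySem.Set.ofList ['<', '>', ':', '"', '/', '\\', '|', '?', '*']

def create_readable_filename_alt (title : String) (artwork_id : Int) (museum_abbrev : String) : String :=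
  let base := String.ofList (((museum_abbrev ++ "-" ++ title).toList).filter
      (fun c => !(PySem.Set.contains pvInvalidSet c)))
  let base := PySem.Str.join " " (PySem.Str.split₀ base)
  let base := if PySem.Str.len base > 100 then
      PySem.Str.strip (PySem.Str.slice base none (some 100)) else base
  base ++ "-" ++ PySem.Int.toStr artwork_id ++ ".jpg"

-- ===== PRECONDITION & SPEC =====
def Spec_create_readable_filename (title : String) (artwork_id : Int) (museum_abbrev : String) (out : String) : Prop := out = create_readable_filename_alt title artwork_id museum_abbrev
instance (title : String) (artwork_id : Int) (museum_abbrev : String) (out : String) : Decidable (Spec_create_readable_filename title artwork_id museum_abbrev out) := by unfold Spec_create_readable_filename; infer_instance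

-- ===== CLAIM (what is proved, stated in full; the proofs are below) =====
def Claim_equal_create_readable_filename : Prop := ∀ (title : String) (artwork_id : Int) (museum_abbrev : String), Dom_create_readable_filename title artwork_id museum_abbrev → Spec_create_readable_filename title artwork_id museum_abbrev (create_readable_filename title artwork_id museum_abbrev)

-- ===== LEMMAS AND PROOFS =====

-- replace.go with a one-character pattern and empty replacement filters that character out
lemma replace_go_filter (ch : Char) (l acc : List Char) (fuel : Nat) (h : l.length ≤ fuel) :
    PySem.Chars.replace.go [ch] [] fuel l acc = acc.reverse ++ l.filter (fun x => !(x == ch)) := by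
  induction l generalizing fuel acc with
  | nil => cases fuel <;> simp [PySem.Chars.replace.go]
  | cons c t ih =>
    cases fuel with
    | zero => simp at h
    | succ f =>
      rw [PySem.Chars.replace.go]
      simp only [List.isPrefixOf, Bool.and_true, List.length_cons] at *
      by_cases hc : ch = c
      · subst hc
        simp [ih acc f (by omega)]
      · have hc1 : (ch == c) = false := by simp [hc]
        have hc2 : (c == ch) = false := by simp [Ne.symm hc]
        simp [hc1, hc2, ih (c :: acc) f (by omega)]

-- s.replace(ch, '') removes every occurrence of ch
lemma replace_char (ch : Char) (s : List Char) :
    PySem.Chars.replace s [ch] [] = s.filter (fun x => !(x == ch)) := by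
  rw [PySem.Chars.replace]
  simp [replace_go_filter ch s [] s.length (le_refl _)]

-- A's nine replace passes equal B's single filter pass, as strings
lemma base_eq (s : String) :
    (["<", ">", ":", "\"", "/", "\\", "|", "?", "*"] : List String).foldl
        (fun t ch => PySem.Str.replace t ch "") s
      = String.ofList (s.toList.filter (fun c => !(PySem.Set.contains pvInvalidSet c))) := by
  rw [← String.toList_inj]
  simp only [List.foldl, PySem.Str.toList_replace, String.toList_ofList]
  have e1 : ("<" : String).toList = ['<'] := by decide
  have e2 : (">" : String).toList = ['>'] := by decide
  have e3 : (":" : String).toList = [':'] := by decide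
  have e4 : ("\"" : String).toList = ['"'] := by decide
  have e5 : ("/" : String).toList = ['/'] := by decide
  have e6 : ("\\" : String).toList = ['\\'] := by decide
  have e7 : ("|" : String).toList = ['|'] := by decide
  have e8 : ("?" : String).toList = ['?'] := by decide
  have e9 : ("*" : String).toList = ['*'] := by decide
  have e0 : ("" : String).toList = [] := by decide
  rw [e1, e2, e3, e4, e5, e6, e7, e8, e9, e0]
  simp only [replace_char, List.filter_filter]
  congr 1
  funext c
  by_cases h1 : c = '<' <;> by_cases h2 : c = '>' <;> by_cases h3 : c = ':' <;>
    by_cases h4 : c = '"' <;> by_cases h5 : c = '/' <;> by_cases h6 : c = '\\' <;>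
    by_cases h7 : c = '|' <;> by_cases h8 : c = '?' <;> by_cases h9 : c = '*' <;>
    simp_all [pvInvalidSet, PySem.Set.ofList, PySem.Set.contains]

-- ===== VERDICT (by name: the statement is the Claim_ definition above) =====
theorem create_readable_filename_spec : Claim_equal_create_readable_filename := by
  intro title artwork_id museum_abbrev _
  unfold Spec_create_readable_filename create_readable_filename create_readable_filename_alt
  simp only [base_eq]
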